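-- pv_equiv track=rewrite | github.com/f-heeger/long_read_metabarcoding | scripts/helpers.py | homopoly
-- ===== SOURCE A (Python) =====
-- def homopoly(kmer):
--     """Check if kmer is a homopolymer"""
--     last=None
--     rv=1
--     h=1
--     for j in range(len(kmer)):
--         if kmer[j] == last:
--             h +=1
--         else:
--             rv=max(rv, h)
--             h=1
--             last = kmer[j]
--     return(max(rv, h))
-- ===== SOURCE B (Python) =====
-- def homopoly(kmer):
--     """Check if kmer is a homopolymer"""
--     best = 1
--     i = 0
--     n = len(kmer)
--     while i < n:
--         j = i + 1
--         while j < n and kmer[j] == kmer[i]: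
--             j += 1
--         if j - i > best:
--             best = j - i
--         i = j
--     return best
-- ===== Notes on version B (the rewrite author's own statement) =====
-- stated objective: alternative
-- what changed: B jumps run-by-run with two indices (inner scan to the end of each maximal run of equal characters, then max of run lengths), instead of A's single per-character pass maintaining last-char/current-count/rolling-max state.
import Mathlib
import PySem

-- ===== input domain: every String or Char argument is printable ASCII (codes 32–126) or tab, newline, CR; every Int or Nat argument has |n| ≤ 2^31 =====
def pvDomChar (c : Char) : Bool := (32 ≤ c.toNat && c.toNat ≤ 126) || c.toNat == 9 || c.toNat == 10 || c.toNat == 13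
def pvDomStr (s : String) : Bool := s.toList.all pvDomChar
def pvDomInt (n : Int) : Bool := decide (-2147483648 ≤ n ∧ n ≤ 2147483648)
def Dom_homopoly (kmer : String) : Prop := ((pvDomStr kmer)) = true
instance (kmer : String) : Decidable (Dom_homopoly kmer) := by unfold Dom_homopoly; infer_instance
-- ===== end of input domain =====

-- B re-implements the longest-equal-run length by jumping run-by-run with two indices
-- (inner scan over each maximal run) instead of A's per-character state machine; alternative
-- decomposition, same O(n) cost.

-- ===== PORT A =====
-- A's loop body: state (last, rv, h); the j-th character is compared to `last`.
def homopolyStep (st : Option Char × Int × Int) (x : Char) : Option Char × Int × Int :=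
  if (some x : Option Char) == st.1 then (st.1, st.2.1, st.2.2 + 1)
  else (some x, max st.2.1 st.2.2, 1)

def homopoly (kmer : String) : Int :=
  let st := kmer.toList.foldl homopolyStep (none, 1, 1)
  max st.2.1 st.2.2

-- ===== PORT B =====
-- Source B's outer while over run starts; the inner `while j < n and kmer[j] == kmer[i]` scan is
-- the takeWhile/dropWhile split at the current character; `if j - i > best` kept as the if.
def homopolyAltGo (best : Int) : List Char → Int
  | [] => best
  | c :: cs =>
      homopolyAltGo
        (if 1 + ((cs.takeWhile (fun x => x == c)).length : Int) > best
         then 1 + ((cs.takeWhile (fun x => x == c)).length : Int) else best)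
        (cs.dropWhile (fun x => x == c))
termination_by l => l.length
decreasing_by exact Nat.lt_succ_of_le (List.length_dropWhile_le _ _)

def homopoly_alt (kmer : String) : Int := homopolyAltGo 1 kmer.toList

-- ===== PRECONDITION & SPEC =====
def Spec_homopoly (kmer : String) (out : Int) : Prop := out = homopoly_alt kmer
instance (kmer : String) (out : Int) : Decidable (Spec_homopoly kmer out) := by unfold Spec_homopoly; infer_instance

-- ===== CLAIM (what is proved, stated in full; the proofs are below) =====
def Claim_equal_homopoly : Prop := ∀ (kmer : String), Dom_homopoly kmer → Spec_homopoly kmer (homopoly kmer)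

-- ===== LEMMAS AND PROOFS =====

theorem if_gt_eq_max (a b : Int) : (if b > a then b else a) = max a b := by
  split_ifs <;> omega

theorem altGo_nil (a : Int) : homopolyAltGo a [] = a := by
  rw [homopolyAltGo]

theorem altGo_cons (a : Int) (c : Char) (cs : List Char) :
    homopolyAltGo a (c :: cs)
      = homopolyAltGo (max a (1 + ((cs.takeWhile (fun x => x == c)).length : Int)))
          (cs.dropWhile (fun x => x == c)) := by
  rw [homopolyAltGo, if_gt_eq_max]

theorem altGo_max_swap : ∀ (n : Nat) (l : List Char), l.length ≤ n →
    ∀ r a : Int, max r (homopolyAltGo a l) = homopolyAltGo (max r a) l := by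
  intro n
  induction n with
  | zero =>
      intro l hl r a
      have : l = [] := List.eq_nil_of_length_eq_zero (Nat.le_zero.mp hl)
      subst this; rw [altGo_nil, altGo_nil]
  | succ n ih =>
      intro l hl r a
      cases l with
      | nil => rw [altGo_nil, altGo_nil]
      | cons c cs =>
          rw [altGo_cons, altGo_cons]
          have hlen : (cs.dropWhile (fun x => x == c)).length ≤ n :=
            le_trans (List.length_dropWhile_le _ _) (Nat.le_of_succ_le_succ hl)
          rw [ih _ hlen]
          congr 1
          exact (max_assoc r a _).symm

-- Invariant for A's fold: the state carries the current run's character c, the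
-- completed-runs max rv and the current run count h.
theorem homopoly_fold_eq : ∀ (l : List Char) (c : Char) (rv h : Int),
    max ((l.foldl homopolyStep (some c, rv, h)).2.1) ((l.foldl homopolyStep (some c, rv, h)).2.2)
      = max rv (homopolyAltGo (h + ((l.takeWhile (fun x => x == c)).length : Int))
                  (l.dropWhile (fun x => x == c))) := by
  intro l
  induction l with
  | nil => intro c rv h; simp [altGo_nil]
  | cons x xs ih =>
      intro c rv h
      by_cases hx : x = c
      · subst hx
        have hb : ((some x : Option Char) == some x) = true := by simp
        simp only [List.foldl, homopolyStep, hb, if_true, List.takeWhile, List.dropWhile,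
          beq_self_eq_true]
        rw [ih x rv (h + 1)]
        congr 2
        simp only [List.length_cons]
        push_cast
        ring
      · have hbeq : (x == c) = false := by simp [hx]
        have hb : ((some x : Option Char) == some c) = false := by simp [hx]
        simp only [List.foldl, homopolyStep, hb, Bool.false_eq_true, if_false,
          List.takeWhile, List.dropWhile, hbeq]
        rw [ih x (max rv h) 1]
        rw [altGo_cons]
        rw [altGo_max_swap _ _ (le_refl _), altGo_max_swap _ _ (le_refl _)]
        congr 1
        simp only [List.length_nil, Nat.cast_zero, add_zero]
        rw [max_assoc]

-- ===== VERDICT (by name: the statement is the Claim_ definition above) =====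
theorem homopoly_spec : Claim_equal_homopoly := by
  intro kmer _
  unfold Spec_homopoly homopoly homopoly_alt
  cases hl : kmer.toList with
  | nil => simp [altGo_nil]
  | cons c cs =>
      have hb : ((some c : Option Char) == (none : Option Char)) = false := rfl
      simp only [List.foldl, homopolyStep, hb, Bool.false_eq_true, if_false, max_self]
      rw [homopoly_fold_eq cs c 1 1]
      rw [altGo_cons]
      rw [← altGo_max_swap _ _ (le_refl _)]
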